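-- pv_equiv track=rewrite | github.com/jceipek/Robotics-AI | foodSearch.py | greedyEaterChooseDir
-- ===== SOURCE A (Python) =====
-- def greedyEaterChooseDir(reading, energy, memory):
--     # Memory is a mutable dictionary
--     if not 'last' in memory:
--         memory['last'] = (0,0)
--     last = memory['last']
--
--     reading[1][1] = 0
--     m = max([item for row in reading for item in row])
--     if m > 0:
--         for y,row in enumerate(reading):
--             for x,_ in enumerate(row):
--                 if reading[y][x] == m:
--                     goal = (x-1,y-1)
--         memory['last'] = goal
--         return goal
--
--     goal = last
--     return goal
-- ===== SOURCE B (Python) =====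
-- def greedyEaterChooseDir(reading, energy, memory):
--     # Memory is a mutable dictionary
--     memory.setdefault('last', (0, 0))
--     reading[1][1] = 0
--     best_val, best_pos = 0, None
--     for y, row in enumerate(reading):
--         for x, v in enumerate(row):
--             if v >= best_val:
--                 best_val, best_pos = v, (x - 1, y - 1)
--     if best_val > 0:
--         memory['last'] = best_pos
--         return best_pos
--     return memory['last']
-- ===== Notes on version B (the rewrite author's own statement) =====
-- stated objective: simpler
-- what changed: Replaces A's two passes (build flattened list + max, then nested rescan for the last maximal cell) by a single fused argmax scan maintaining (best_val, best_pos) with a >= update so ties keep the last cell in row-major order.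
import Mathlib
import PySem

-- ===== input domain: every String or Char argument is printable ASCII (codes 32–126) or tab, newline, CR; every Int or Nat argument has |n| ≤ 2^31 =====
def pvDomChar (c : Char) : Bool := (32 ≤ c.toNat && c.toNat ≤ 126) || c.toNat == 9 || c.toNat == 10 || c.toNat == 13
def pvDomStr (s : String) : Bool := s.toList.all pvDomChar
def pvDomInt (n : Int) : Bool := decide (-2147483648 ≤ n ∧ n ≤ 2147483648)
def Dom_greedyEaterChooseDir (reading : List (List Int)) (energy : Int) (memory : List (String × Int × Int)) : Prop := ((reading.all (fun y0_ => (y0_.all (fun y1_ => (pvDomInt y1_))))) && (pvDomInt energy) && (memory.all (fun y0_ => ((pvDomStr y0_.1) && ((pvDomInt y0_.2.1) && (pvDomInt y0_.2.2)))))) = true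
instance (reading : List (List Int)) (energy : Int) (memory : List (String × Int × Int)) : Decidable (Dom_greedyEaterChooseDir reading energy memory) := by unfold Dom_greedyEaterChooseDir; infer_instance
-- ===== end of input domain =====

-- B fuses A's separate max computation and its nested rescan into a single argmax pass (simpler).
-- Both A and B mutate reading[1][1] and memory['last'] in place identically; the theorems here are about the return value.

-- ===== PORT A =====
def greedyEaterChooseDir (reading : List (List Int)) (energy : Int) (memory : List (String × Int × Int)) : Int × Int :=
  -- if not 'last' in memory: memory['last'] = (0,0)
  let memD : PySem.Dict String (Int × Int) := PySem.Dict.mk memory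
  let memD := if memD.contains "last" then memD else memD.insert "last" ((0 : Int), (0 : Int))
  -- last = memory['last']   ('last' is present after the insert; getD is exact here)
  let last := (memD.get? "last").getD ((0 : Int), (0 : Int))
  -- reading[1][1] = 0   (in range under Pre_; List.set is the in-place assignment there)
  let reading := reading.set 1 ((reading.getD 1 []).set 1 0)
  -- m = max([item for row in reading for item in row])
  let flat := reading.foldl (fun acc row => acc ++ row) []
  match PySem.List.max? flat (fun v => v) with
  | none => last          -- Python raises ValueError here; excluded by Pre_
  | some m =>
    if 0 < m then
      -- nested rescan: goal overwritten at every cell equal to m (last one wins)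
      let goal := (PySem.List.enumerate reading).foldl (fun g (yrow : Int × List Int) =>
          (PySem.List.enumerate yrow.2).foldl (fun g (xv : Int × Int) =>
            if ((reading.getD yrow.1.toNat []).getD xv.1.toNat 0) = m then
              some (xv.1 - 1, yrow.1 - 1) else g) g)
          (none : Option (Int × Int))
      goal.getD last      -- m > 0 is attained, so goal is always some; getD is exact here
    else last

-- ===== PORT B =====
def greedyEaterChooseDir_alt (reading : List (List Int)) (energy : Int) (memory : List (String × Int × Int)) : Int × Int :=
  let memD : PySem.Dict String (Int × Int) := PySem.Dict.mk memory
  let memD := memD.setdefault "last" ((0 : Int), (0 : Int))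
  let reading := reading.set 1 ((reading.getD 1 []).set 1 0)
  let best := (PySem.List.enumerate reading).foldl (fun b (yrow : Int × List Int) =>
      (PySem.List.enumerate yrow.2).foldl (fun (b : Int × Option (Int × Int)) (xv : Int × Int) =>
        if b.1 ≤ xv.2 then (xv.2, some (xv.1 - 1, yrow.1 - 1)) else b) b)
      ((0 : Int), (none : Option (Int × Int)))
  if 0 < best.1 then best.2.getD ((0 : Int), (0 : Int))
  else (memD.get? "last").getD ((0 : Int), (0 : Int))

-- ===== PRECONDITION & SPEC =====
-- Pre_ excludes exactly the inputs on which A raises IndexError at reading[1][1] = 0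
-- (fewer than two rows, or row 1 shorter than two); the max() call then always has a nonempty list.
def Pre_greedyEaterChooseDir (reading : List (List Int)) (energy : Int) (memory : List (String × Int × Int)) : Prop :=
  2 ≤ reading.length ∧ 2 ≤ (reading.getD 1 []).length
instance (reading : List (List Int)) (energy : Int) (memory : List (String × Int × Int)) : Decidable (Pre_greedyEaterChooseDir reading energy memory) := by unfold Pre_greedyEaterChooseDir; infer_instance

def pvWitness_greedyEaterChooseDir : List (List Int) × Int × (List (String × Int × Int)) :=
  ([[0, 2, 0], [0, 9, 1], [0, 0, 0]], 5, [("last", 1, 0)])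

def Spec_greedyEaterChooseDir (reading : List (List Int)) (energy : Int) (memory : List (String × Int × Int)) (out : Int × Int) : Prop := out = greedyEaterChooseDir_alt reading energy memory
instance (reading : List (List Int)) (energy : Int) (memory : List (String × Int × Int)) (out : Int × Int) : Decidable (Spec_greedyEaterChooseDir reading energy memory out) := by unfold Spec_greedyEaterChooseDir; infer_instance

-- ===== CLAIM (what is proved, stated in full; the proofs are below) =====
def Claim_equal_greedyEaterChooseDir : Prop := ∀ (reading : List (List Int)) (energy : Int) (memory : List (String × Int × Int)), Dom_greedyEaterChooseDir reading energy memory → Pre_greedyEaterChooseDir reading energy memory → Spec_greedyEaterChooseDir reading energy memory (greedyEaterChooseDir reading energy memory)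

-- ===== LEMMAS AND PROOFS =====

-- shared vocabulary for the two scans: cells as (value, position) pairs in row-major order
def stepB (b : Int × Option (Int × Int)) (vp : Int × (Int × Int)) : Int × Option (Int × Int) :=
  if b.1 ≤ vp.1 then (vp.1, some vp.2) else b

def stepA (m : Int) (g : Option (Int × Int)) (vp : Int × (Int × Int)) : Option (Int × Int) :=
  if vp.1 = m then some vp.2 else g

def pairsOf (R : List (List Int)) : List (Int × (Int × Int)) :=
  (PySem.List.enumerate R).flatMap (fun yr => (PySem.List.enumerate yr.2).map (fun xv => (xv.2, (xv.1 - 1, yr.1 - 1))))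

theorem map_fst_pairsOf (R : List (List Int)) : (pairsOf R).map Prod.fst = R.flatMap id := by
  simp only [pairsOf, List.map_flatMap, List.map_map, Function.comp_def]
  simp only [List.flatMap_def]
  simp [PySem.List.map_snd_enumerate]

theorem b_fold_eq (R : List (List Int)) :
    (PySem.List.enumerate R).foldl (fun b (yrow : Int × List Int) =>
        (PySem.List.enumerate yrow.2).foldl (fun (b : Int × Option (Int × Int)) (xv : Int × Int) =>
          if b.1 ≤ xv.2 then (xv.2, some (xv.1 - 1, yrow.1 - 1)) else b) b)
      ((0 : Int), (none : Option (Int × Int)))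
    = (pairsOf R).foldl stepB ((0 : Int), none) := by
  simp [pairsOf, List.foldl_flatMap, List.foldl_map, stepB]

theorem a_fold_eq (R : List (List Int)) (m : Int) :
    (PySem.List.enumerate R).foldl (fun g (yrow : Int × List Int) =>
        (PySem.List.enumerate yrow.2).foldl (fun g (xv : Int × Int) =>
          if ((R.getD yrow.1.toNat []).getD xv.1.toNat 0) = m then
            some (xv.1 - 1, yrow.1 - 1) else g) g)
      (none : Option (Int × Int))
    = (pairsOf R).foldl (stepA m) none := by
  rw [PySem.List.foldl_congr_mem' _ _
    (fun g (yrow : Int × List Int) =>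
      (PySem.List.enumerate yrow.2).foldl (fun g (xv : Int × Int) => stepA m g (xv.2, (xv.1 - 1, yrow.1 - 1))) g) _ ?_]
  · simp [pairsOf, List.foldl_flatMap, List.foldl_map]
  · intro yrow hy acc
    obtain ⟨k, hk, hyr⟩ := (PySem.List.mem_enumerate_iff _ _ _).mp hy
    subst hyr
    refine PySem.List.foldl_congr_mem' _ _ _ _ ?_
    intro xv hx acc'
    obtain ⟨j, hj, hxv⟩ := (PySem.List.mem_enumerate_iff _ _ _).mp hx
    subst hxv
    simp [stepA, List.getD_eq_getElem?_getD, hk, hj]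

theorem foldl_max_comm (l : List Int) (a b : Int) :
    l.foldl max (max a b) = max a (l.foldl max b) := by
  induction l generalizing b with
  | nil => rfl
  | cons c l ih => simpa [List.foldl_cons, max_assoc] using ih (max b c)

theorem key_fold (L : List (Int × (Int × Int))) :
    (L.foldl stepB ((0 : Int), none)).1 = (L.map Prod.fst).foldl max 0 ∧
    (0 < (L.foldl stepB ((0 : Int), none)).1 →
      ((L.foldl stepB ((0 : Int), none)).2.isSome ∧
       L.foldl (stepA (L.foldl stepB ((0 : Int), none)).1) none = (L.foldl stepB ((0 : Int), none)).2)) := by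
  induction L using List.reverseRecOn with
  | nil => simp
  | append_singleton L vp ih =>
    obtain ⟨ih1, ih2⟩ := ih
    simp only [List.foldl_append, List.foldl_cons, List.foldl_nil, List.map_append,
      List.map_cons, List.map_nil]
    by_cases h : (L.foldl stepB ((0 : Int), none)).1 ≤ vp.1
    · refine ⟨?_, ?_⟩
      · simp [stepB, h, ← ih1]
      · intro _
        simp [stepB, h, stepA]
    · have hlt : vp.1 < (L.foldl stepB ((0 : Int), none)).1 := not_le.mp h
      refine ⟨?_, ?_⟩
      · simp [stepB, h, ← ih1, max_eq_left (le_of_lt hlt)]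
      · intro hpos
        simp only [stepB, if_neg h] at hpos ⊢
        obtain ⟨hsome, hA⟩ := ih2 hpos
        refine ⟨hsome, ?_⟩
        rw [stepA, if_neg (by omega), hA]

-- ===== VERDICT (by name: the statement is the Claim_ definition above) =====
theorem greedyEaterChooseDir_spec : Claim_equal_greedyEaterChooseDir := by
  intro reading energy memory _ hpre
  obtain ⟨h2, hrow⟩ := hpre
  unfold Spec_greedyEaterChooseDir
  have hmem : ∀ (d : PySem.Dict String (Int × Int)),
      (if d.contains "last" then d else d.insert "last" ((0 : Int), (0 : Int)))
        = d.setdefault "last" ((0 : Int), (0 : Int)) := by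
    intro d
    by_cases h : d.contains "last"
    · rw [if_pos h, PySem.Dict.setdefault_of_contains d _ h]
    · rw [if_neg h, PySem.Dict.setdefault_of_not_contains d _ (by simpa using h)]
  have hflat : ∀ (l : List (List Int)), l.foldl (fun acc row => acc ++ row) [] = l.flatMap id := by
    intro l
    simpa using PySem.List.foldl_append_eq_flatMap (fun x => x) l []
  simp only [greedyEaterChooseDir, greedyEaterChooseDir_alt, hmem, hflat, b_fold_eq, a_fold_eq]
  set R := reading.set 1 ((reading.getD 1 []).set 1 0) with hRdef
  -- the flattened grid is nonempty: row 1 exists and has length ≥ 2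
  have hrowR : R[1]? = some ((reading.getD 1 []).set 1 0) :=
    List.getElem?_set_self (by omega)
  have hFne : R.flatMap id ≠ [] := by
    have hmemrow : ((reading.getD 1 []).set 1 0) ∈ R := List.mem_of_getElem? hrowR
    have hz : (0 : Int) ∈ ((reading.getD 1 []).set 1 0) :=
      List.mem_of_getElem? (List.getElem?_set_self (by omega))
    exact List.ne_nil_of_mem (List.mem_flatMap.mpr ⟨_, hmemrow, hz⟩)
  obtain ⟨x, t, hxt⟩ : ∃ x t, R.flatMap id = x :: t := by
    cases h : R.flatMap id with
    | nil => exact absurd h hFne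
    | cons x t => exact ⟨x, t, rfl⟩
  simp only [hxt, PySem.List.max?_id_cons]
  have hkey := key_fold (pairsOf R)
  have hr1 : ((pairsOf R).foldl stepB ((0 : Int), none)).1 = max 0 (t.foldl max x) := by
    rw [hkey.1, map_fst_pairsOf, hxt, List.foldl_cons,
      show max 0 x = max (0 : Int) x from rfl, foldl_max_comm]
  by_cases hm : 0 < t.foldl max x
  · rw [if_pos hm]
    have hpos : 0 < ((pairsOf R).foldl stepB ((0 : Int), none)).1 := by rw [hr1]; omega
    obtain ⟨hsome, hA⟩ := hkey.2 hpos
    have hmr : ((pairsOf R).foldl stepB ((0 : Int), none)).1 = t.foldl max x := by rw [hr1]; omega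
    rw [hmr] at hA
    rw [if_pos hpos, hA]
    obtain ⟨z, hz⟩ := Option.isSome_iff_exists.mp hsome
    rw [hz]
    rfl
  · rw [if_neg hm, if_neg (show ¬ 0 < ((pairsOf R).foldl stepB ((0 : Int), none)).1 by rw [hr1]; omega)]
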